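-- pv_equiv track=rewrite | github.com/oxai/deepsaber | scripts/feature_extraction/features_base.py | convert_note_positions_and_type_to_cut_direction
-- ===== SOURCE A (Python) =====
-- def convert_note_positions_and_type_to_cut_direction(line_layer, line_index, note_type):
--     num_beats = len(line_layer)
--     cut_direction = [8]
--     # cutDirection: note cut direction (  0=up; 1=down; 2=left; 3=right;
--     #                                        4=up-left; 5=up-right; 6=down-left; 7=down-right;
--     #                                        8=no-direction
--     reverse_directions = [1, 0, 3, 2, 7, 6, 5, 4, 8]
--     # reverse_horizontal = [0, 1, 3, 2, 3, 2, 3, 2, 8]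
--     # reverse_vertical = [1, 0, 2, 3, 1, 1, 2, 2, 8]
--     last_of_type = [-1, -1, -1]
--     for i in range(1, num_beats):
--         if(last_of_type[note_type[i]] == -1):
--             last_idx = i-1
--         else:
--             last_idx = last_of_type[note_type[i]]
--         if line_layer[i] > line_layer[last_idx]:
--             # up
--             if line_index[i] > line_index[last_idx]:
--                 # right
--                 cut_direction.append(5)
--             elif line_index[i] < line_index[last_idx]:
--                 # left
--                 cut_direction.append(4)
--             else:
--                 # no-hor change
--                 cut_direction.append(0)
--         elif line_layer[i] < line_layer[last_idx]:
--             # down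
--             if line_index[i] > line_index[last_idx]:
--                 # right
--                 cut_direction.append(7)
--             elif line_index[i] < line_index[last_idx]:
--                 # left
--                 cut_direction.append(6)
--             else:
--                 # no-hor change
--                 cut_direction.append(1)
--         else:
--             # no-vert change
--             if line_index[i] > line_index[last_idx]:
--                 # right
--                 cut_direction.append(3)
--             elif line_index[i] < line_index[last_idx]:
--                 # left
--                 cut_direction.append(2)
--             else:
--                 # no-hor change
--                 cut_direction.append(reverse_directions[cut_direction[-1]])
--         last_of_type[note_type[i]] = i
--     return cut_direction
-- ===== SOURCE B (Python) =====
-- DIR = {(1, 1): 5, (1, -1): 4, (1, 0): 0,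
--        (-1, 1): 7, (-1, -1): 6, (-1, 0): 1,
--        (0, 1): 3, (0, -1): 2}
-- REV = (1, 0, 3, 2, 7, 6, 5, 4, 8)
--
--
-- def convert_note_positions_and_type_to_cut_direction(line_layer, line_index, note_type):
--     # Phase 1: movement signature per beat relative to its reference note
--     # (the previous note of the same type); None marks a stalled note.
--     last = [-1, -1, -1]
--     raw = [8]
--     for i in range(1, len(line_layer)):
--         t = note_type[i]
--         j = i - 1 if last[t] == -1 else last[t]
--         last[t] = i
--         dv = (line_layer[i] > line_layer[j]) - (line_layer[i] < line_layer[j])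
--         dh = (line_index[i] > line_index[j]) - (line_index[i] < line_index[j])
--         raw.append(None if (dv, dh) == (0, 0) else DIR[dv, dh])
--     # Phase 2: a stalled note takes the reverse of the preceding direction;
--     # since reversal is an involution, a stalled run simply alternates
--     # base / REV[base] -- no need to re-read the output list.
--     out = []
--     base, flipped = 8, False
--     for d in raw:
--         if d is None:
--             flipped = not flipped
--             out.append(REV[base] if flipped else base)
--         else:
--             out.append(d)
--             base, flipped = d, False
--     return out
-- ===== Notes on version B (the rewrite author's own statement) =====
-- stated objective: alternative
-- what changed: Two-phase algorithm: first pass records each beat's movement signature (None for a stalled beat), second pass resolves stalled beats with a base/flag alternation that exploits reversal being an involution, so the output list is never re-read; A does everything in one fused loop reading cut_direction[-1].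
import Mathlib
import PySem

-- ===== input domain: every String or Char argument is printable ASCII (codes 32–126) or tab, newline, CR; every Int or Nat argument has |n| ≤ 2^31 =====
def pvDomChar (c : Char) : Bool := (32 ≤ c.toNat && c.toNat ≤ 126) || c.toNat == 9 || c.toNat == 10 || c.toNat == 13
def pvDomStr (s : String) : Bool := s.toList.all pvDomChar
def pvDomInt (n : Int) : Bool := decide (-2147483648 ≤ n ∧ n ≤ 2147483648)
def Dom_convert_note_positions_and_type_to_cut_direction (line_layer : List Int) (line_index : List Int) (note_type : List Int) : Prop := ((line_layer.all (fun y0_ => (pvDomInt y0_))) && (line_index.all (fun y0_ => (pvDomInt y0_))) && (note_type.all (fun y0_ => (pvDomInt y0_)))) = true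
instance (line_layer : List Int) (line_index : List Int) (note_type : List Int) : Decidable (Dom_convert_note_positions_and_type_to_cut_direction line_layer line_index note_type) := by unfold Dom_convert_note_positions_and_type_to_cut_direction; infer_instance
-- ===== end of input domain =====

-- B splits A's single loop into two phases: compute each beat's movement signature (None = stalled),
-- then resolve stalled beats by an alternation flag exploiting that direction reversal is an
-- involution — the output list is never re-read; alternative structure, same cost.

-- ===== PORT A =====
def convert_note_positions_and_type_to_cut_direction (line_layer : List Int) (line_index : List Int) (note_type : List Int) : List Int :=
  let num_beats : Int := line_layer.length
  let reverse_directions : List Int := [1, 0, 3, 2, 7, 6, 5, 4, 8]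
  let r := (PySem.List.pyRange 1 num_beats 1).foldl
    (fun (st : List Int × List Int) (i : Int) =>
      let cd := st.1
      let lot := st.2
      let t := PySem.List.pyGetD note_type i 0
      let last_idx : Int := if PySem.List.pyGetD lot t 0 = -1 then i - 1 else PySem.List.pyGetD lot t 0
      let dir : Int :=
        if PySem.List.pyGetD line_layer i 0 > PySem.List.pyGetD line_layer last_idx 0 then
          (if PySem.List.pyGetD line_index i 0 > PySem.List.pyGetD line_index last_idx 0 then 5
           else if PySem.List.pyGetD line_index i 0 < PySem.List.pyGetD line_index last_idx 0 then 4
           else 0)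
        else if PySem.List.pyGetD line_layer i 0 < PySem.List.pyGetD line_layer last_idx 0 then
          (if PySem.List.pyGetD line_index i 0 > PySem.List.pyGetD line_index last_idx 0 then 7
           else if PySem.List.pyGetD line_index i 0 < PySem.List.pyGetD line_index last_idx 0 then 6
           else 1)
        else
          (if PySem.List.pyGetD line_index i 0 > PySem.List.pyGetD line_index last_idx 0 then 3
           else if PySem.List.pyGetD line_index i 0 < PySem.List.pyGetD line_index last_idx 0 then 2
           else PySem.List.pyGetD reverse_directions (PySem.List.pyGetD cd (-1) 8) 8)
      (cd ++ [dir], PySem.List.pySetD lot t i))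
    ([8], [-1, -1, -1])
  r.1

-- ===== PORT B =====
-- the module-level DIR dict and REV tuple of Source B
def pvDIR : PySem.Dict (Int × Int) Int :=
  PySem.Dict.ofList
    [((1, 1), 5), ((1, -1), 4), ((1, 0), 0),
     ((-1, 1), 7), ((-1, -1), 6), ((-1, 0), 1),
     ((0, 1), 3), ((0, -1), 2)]
def pvREV : List Int := [1, 0, 3, 2, 7, 6, 5, 4, 8]

-- phase 1 loop body: append the movement signature (none = stalled), update last_of_type
def pvRawStep (line_layer line_index note_type : List Int)
    (st : List (Option Int) × List Int) (i : Int) : List (Option Int) × List Int :=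
  let t := PySem.List.pyGetD note_type i 0
  let j : Int := if PySem.List.pyGetD st.2 t 0 = -1 then i - 1 else PySem.List.pyGetD st.2 t 0
  let dv : Int := (if PySem.List.pyGetD line_layer i 0 > PySem.List.pyGetD line_layer j 0 then 1 else 0)
                - (if PySem.List.pyGetD line_layer i 0 < PySem.List.pyGetD line_layer j 0 then 1 else 0)
  let dh : Int := (if PySem.List.pyGetD line_index i 0 > PySem.List.pyGetD line_index j 0 then 1 else 0)
                - (if PySem.List.pyGetD line_index i 0 < PySem.List.pyGetD line_index j 0 then 1 else 0)
  -- DIR[dv, dh]: the key is present whenever (dv, dh) ≠ (0, 0), so the default is unreachable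
  (st.1 ++ [if dv = 0 ∧ dh = 0 then none else some ((PySem.Dict.get? pvDIR (dv, dh)).getD 0)],
   PySem.List.pySetD st.2 t i)

-- phase 2 loop body: stalled beats alternate base / REV[base] via the flag
def pvResolveStep (st : List Int × Int × Bool) (d : Option Int) : List Int × Int × Bool :=
  match d with
  | none =>
      let f := !st.2.2
      (st.1 ++ [if f then PySem.List.pyGetD pvREV st.2.1 8 else st.2.1], st.2.1, f)
  | some v => (st.1 ++ [v], v, false)

def convert_note_positions_and_type_to_cut_direction_alt (line_layer : List Int) (line_index : List Int) (note_type : List Int) : List Int :=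
  let raw := ((PySem.List.pyRange 1 (line_layer.length : Int) 1).foldl
      (pvRawStep line_layer line_index note_type) ([some 8], [-1, -1, -1])).1
  (raw.foldl pvResolveStep ([], 8, false)).1

-- ===== PRECONDITION & SPEC =====
-- Pre_ excludes exactly the inputs where the Python A raises IndexError: when the loop runs
-- (len(line_layer) >= 2) the other two lists must be at least as long and every used note_type
-- entry must be a valid index into the 3-element last_of_type list (-3 .. 2, Python wraparound included).
def Pre_convert_note_positions_and_type_to_cut_direction (line_layer : List Int) (line_index : List Int) (note_type : List Int) : Prop :=
  line_layer.length ≤ 1 ∨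
    (line_layer.length ≤ line_index.length ∧ line_layer.length ≤ note_type.length ∧
      ∀ t ∈ (note_type.take line_layer.length).drop 1, -3 ≤ t ∧ t ≤ 2)
instance (line_layer : List Int) (line_index : List Int) (note_type : List Int) : Decidable (Pre_convert_note_positions_and_type_to_cut_direction line_layer line_index note_type) := by unfold Pre_convert_note_positions_and_type_to_cut_direction; infer_instance
def pvWitness_convert_note_positions_and_type_to_cut_direction : List Int × List Int × List Int := ([0, 1, 1], [0, 0, 1], [0, 1, 0])
def Spec_convert_note_positions_and_type_to_cut_direction (line_layer : List Int) (line_index : List Int) (note_type : List Int) (out : List Int) : Prop := out = convert_note_positions_and_type_to_cut_direction_alt line_layer line_index note_type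
instance (line_layer : List Int) (line_index : List Int) (note_type : List Int) (out : List Int) : Decidable (Spec_convert_note_positions_and_type_to_cut_direction line_layer line_index note_type out) := by unfold Spec_convert_note_positions_and_type_to_cut_direction; infer_instance

-- ===== CLAIM (what is proved, stated in full; the proofs are below) =====
def Claim_equal_convert_note_positions_and_type_to_cut_direction : Prop := ∀ (line_layer : List Int) (line_index : List Int) (note_type : List Int), Dom_convert_note_positions_and_type_to_cut_direction line_layer line_index note_type → Pre_convert_note_positions_and_type_to_cut_direction line_layer line_index note_type → Spec_convert_note_positions_and_type_to_cut_direction line_layer line_index note_type (convert_note_positions_and_type_to_cut_direction line_layer line_index note_type)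

-- ===== LEMMAS AND PROOFS =====

-- the movement signature one pvRawStep appends, abstracted over the four compared values
def pvSig (a b c d : Int) : Option Int :=
  let dv : Int := (if a > b then 1 else 0) - (if a < b then 1 else 0)
  let dh : Int := (if c > d then 1 else 0) - (if c < d then 1 else 0)
  if dv = 0 ∧ dh = 0 then none else some ((PySem.Dict.get? pvDIR (dv, dh)).getD 0)

-- the invariant phase 2's state keeps: last emitted value = base or REV[base] per the flag, base in range
def pvInv (s : List Int × Int × Bool) : Prop :=
  PySem.List.pyGetD s.1 (-1) 8 = (if s.2.2 then PySem.List.pyGetD pvREV s.2.1 8 else s.2.1)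
  ∧ 0 ≤ s.2.1 ∧ s.2.1 ≤ 8

-- resolving one signature appends exactly what A's fused 9-branch step appends
theorem pvStep_fst (a b c d : Int) (s : List Int × Int × Bool) (h : pvInv s) :
    (pvResolveStep s (pvSig a b c d)).1
      = s.1 ++ [if a > b then (if c > d then (5:Int) else if c < d then 4 else 0)
                else if a < b then (if c > d then 7 else if c < d then 6 else 1)
                else if c > d then 3 else if c < d then 2
                else PySem.List.pyGetD [1, 0, 3, 2, 7, 6, 5, 4, 8] (PySem.List.pyGetD s.1 (-1) 8) 8] := by
  obtain ⟨out, base, flip⟩ := s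
  obtain ⟨hlast, h0, h8⟩ := h
  simp only at hlast h0 h8
  by_cases h1 : a > b <;> by_cases h1' : a < b <;> by_cases h2 : c > d <;> by_cases h2' : c < d <;>
    first
    | omega
    | (simp only [pvSig, pvResolveStep, h1, h1', h2, h2'] <;> rfl)
    | -- the stalled case: REV is an involution on 0..8, so base/flag reproduce REV[out[-1]]
      (simp only [pvSig, pvResolveStep, h1, h1', h2, h2', sub_self, and_self]
       rw [hlast]
       cases flip <;> simp only [Bool.not_true, Bool.not_false, Bool.false_eq_true,
         if_true, if_false]
       · rfl
       · interval_cases base <;> rfl)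

-- resolving one signature preserves the invariant
theorem pvStep_inv (a b c d : Int) (s : List Int × Int × Bool) (h : pvInv s) :
    pvInv (pvResolveStep s (pvSig a b c d)) := by
  obtain ⟨out, base, flip⟩ := s
  obtain ⟨hlast, h0, h8⟩ := h
  by_cases h1 : a > b <;> by_cases h1' : a < b <;> by_cases h2 : c > d <;> by_cases h2' : c < d <;>
    first
    | omega
    | (simp only [pvSig, h1, h1', h2, h2']
       norm_num [pvResolveStep, pvInv, PySem.List.pyGetD_neg_one_append_singleton]
       all_goals first | decide | exact h0 | exact h8 | exact ⟨h0, h8⟩ | rfl)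

-- phase 1 accumulation is prefix-independent
theorem pvRaw_prefix (line_layer line_index note_type : List Int) (L : List Int)
    (rs : List (Option Int)) (lot : List Int) :
    L.foldl (pvRawStep line_layer line_index note_type) (rs, lot)
      = (rs ++ (L.foldl (pvRawStep line_layer line_index note_type) ([], lot)).1,
         (L.foldl (pvRawStep line_layer line_index note_type) ([], lot)).2) := by
  induction L generalizing rs lot with
  | nil => simp
  | cons i L ih =>
    simp only [List.foldl_cons, pvRawStep]
    rw [ih]
    conv_rhs => rw [ih]
    simp

-- main invariant: A's fused fold = B's raw fold resolved from any invariant state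
theorem pvMain (line_layer line_index note_type : List Int) (L : List Int)
    (lot : List Int) (s : List Int × Int × Bool) (h : pvInv s) :
    (L.foldl (fun (st : List Int × List Int) (i : Int) =>
      let cd := st.1
      let lot := st.2
      let t := PySem.List.pyGetD note_type i 0
      let last_idx : Int := if PySem.List.pyGetD lot t 0 = -1 then i - 1 else PySem.List.pyGetD lot t 0
      let dir : Int :=
        if PySem.List.pyGetD line_layer i 0 > PySem.List.pyGetD line_layer last_idx 0 then
          (if PySem.List.pyGetD line_index i 0 > PySem.List.pyGetD line_index last_idx 0 then 5
           else if PySem.List.pyGetD line_index i 0 < PySem.List.pyGetD line_index last_idx 0 then 4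
           else 0)
        else if PySem.List.pyGetD line_layer i 0 < PySem.List.pyGetD line_layer last_idx 0 then
          (if PySem.List.pyGetD line_index i 0 > PySem.List.pyGetD line_index last_idx 0 then 7
           else if PySem.List.pyGetD line_index i 0 < PySem.List.pyGetD line_index last_idx 0 then 6
           else 1)
        else
          (if PySem.List.pyGetD line_index i 0 > PySem.List.pyGetD line_index last_idx 0 then 3
           else if PySem.List.pyGetD line_index i 0 < PySem.List.pyGetD line_index last_idx 0 then 2
           else PySem.List.pyGetD [1, 0, 3, 2, 7, 6, 5, 4, 8] (PySem.List.pyGetD cd (-1) 8) 8)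
      (cd ++ [dir], PySem.List.pySetD lot t i)) (s.1, lot)).1
    = (((L.foldl (pvRawStep line_layer line_index note_type) ([], lot)).1).foldl pvResolveStep s).1 := by
  induction L generalizing lot s with
  | nil => simp
  | cons i L ih =>
    rw [List.foldl_cons, List.foldl_cons, pvRaw_prefix]
    rw [show pvRawStep line_layer line_index note_type ([], lot) i
        = ([pvSig (PySem.List.pyGetD line_layer i 0)
              (PySem.List.pyGetD line_layer
                (if PySem.List.pyGetD lot (PySem.List.pyGetD note_type i 0) 0 = -1 then i - 1
                 else PySem.List.pyGetD lot (PySem.List.pyGetD note_type i 0) 0) 0)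
              (PySem.List.pyGetD line_index i 0)
              (PySem.List.pyGetD line_index
                (if PySem.List.pyGetD lot (PySem.List.pyGetD note_type i 0) 0 = -1 then i - 1
                 else PySem.List.pyGetD lot (PySem.List.pyGetD note_type i 0) 0) 0)],
           PySem.List.pySetD lot (PySem.List.pyGetD note_type i 0) i) from rfl]
    rw [List.singleton_append, List.foldl_cons]
    have hstate : (fun (st : List Int × List Int) (i : Int) =>
      let cd := st.1
      let lot := st.2
      let t := PySem.List.pyGetD note_type i 0
      let last_idx : Int := if PySem.List.pyGetD lot t 0 = -1 then i - 1 else PySem.List.pyGetD lot t 0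
      let dir : Int :=
        if PySem.List.pyGetD line_layer i 0 > PySem.List.pyGetD line_layer last_idx 0 then
          (if PySem.List.pyGetD line_index i 0 > PySem.List.pyGetD line_index last_idx 0 then 5
           else if PySem.List.pyGetD line_index i 0 < PySem.List.pyGetD line_index last_idx 0 then 4
           else 0)
        else if PySem.List.pyGetD line_layer i 0 < PySem.List.pyGetD line_layer last_idx 0 then
          (if PySem.List.pyGetD line_index i 0 > PySem.List.pyGetD line_index last_idx 0 then 7
           else if PySem.List.pyGetD line_index i 0 < PySem.List.pyGetD line_index last_idx 0 then 6
           else 1)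
        else
          (if PySem.List.pyGetD line_index i 0 > PySem.List.pyGetD line_index last_idx 0 then 3
           else if PySem.List.pyGetD line_index i 0 < PySem.List.pyGetD line_index last_idx 0 then 2
           else PySem.List.pyGetD [1, 0, 3, 2, 7, 6, 5, 4, 8] (PySem.List.pyGetD cd (-1) 8) 8)
      (cd ++ [dir], PySem.List.pySetD lot t i)) (s.1, lot) i
        = ((pvResolveStep s (pvSig (PySem.List.pyGetD line_layer i 0)
              (PySem.List.pyGetD line_layer
                (if PySem.List.pyGetD lot (PySem.List.pyGetD note_type i 0) 0 = -1 then i - 1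
                 else PySem.List.pyGetD lot (PySem.List.pyGetD note_type i 0) 0) 0)
              (PySem.List.pyGetD line_index i 0)
              (PySem.List.pyGetD line_index
                (if PySem.List.pyGetD lot (PySem.List.pyGetD note_type i 0) 0 = -1 then i - 1
                 else PySem.List.pyGetD lot (PySem.List.pyGetD note_type i 0) 0) 0))).1,
           PySem.List.pySetD lot (PySem.List.pyGetD note_type i 0) i) := by
      rw [pvStep_fst _ _ _ _ _ h]
    have key := ih (PySem.List.pySetD lot (PySem.List.pyGetD note_type i 0) i)
      (pvResolveStep s (pvSig (PySem.List.pyGetD line_layer i 0)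
              (PySem.List.pyGetD line_layer
                (if PySem.List.pyGetD lot (PySem.List.pyGetD note_type i 0) 0 = -1 then i - 1
                 else PySem.List.pyGetD lot (PySem.List.pyGetD note_type i 0) 0) 0)
              (PySem.List.pyGetD line_index i 0)
              (PySem.List.pyGetD line_index
                (if PySem.List.pyGetD lot (PySem.List.pyGetD note_type i 0) 0 = -1 then i - 1
                 else PySem.List.pyGetD lot (PySem.List.pyGetD note_type i 0) 0) 0)))
      (pvStep_inv (PySem.List.pyGetD line_layer i 0)
              (PySem.List.pyGetD line_layer
                (if PySem.List.pyGetD lot (PySem.List.pyGetD note_type i 0) 0 = -1 then i - 1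
                 else PySem.List.pyGetD lot (PySem.List.pyGetD note_type i 0) 0) 0)
              (PySem.List.pyGetD line_index i 0)
              (PySem.List.pyGetD line_index
                (if PySem.List.pyGetD lot (PySem.List.pyGetD note_type i 0) 0 = -1 then i - 1
                 else PySem.List.pyGetD lot (PySem.List.pyGetD note_type i 0) 0) 0) s h)
    rw [← hstate] at key
    exact key

-- ===== VERDICT (by name: the statement is the Claim_ definition above) =====
theorem convert_note_positions_and_type_to_cut_direction_spec : Claim_equal_convert_note_positions_and_type_to_cut_direction := by
  intro line_layer line_index note_type _ _
  unfold Spec_convert_note_positions_and_type_to_cut_direction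
  unfold convert_note_positions_and_type_to_cut_direction convert_note_positions_and_type_to_cut_direction_alt
  simp only
  rw [pvRaw_prefix]
  simp only [List.singleton_append, List.foldl_cons]
  rw [show pvResolveStep ([], 8, false) (some 8) = ([8], 8, false) from rfl]
  exact pvMain line_layer line_index note_type _ _ ([8], 8, false) (by constructor <;> decide)
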